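-- pv_equiv track=rewrite | github.com/ffvasconcelos/TeoriaDosGrafosCodes | info.py | regular
-- ===== SOURCE A (Python) =====
-- def regular(matAdj):
--
--     grauAnterior = -1
--
--     for i in range(len(matAdj)):
--         grau = 0
--         for j in range(len(matAdj)):
--             if matAdj[i][j] != 0:
--                 grau += 1
--         if grauAnterior != -1 and grauAnterior != grau:
--             return False
--
--         grauAnterior = grau
--
--     return True
-- ===== SOURCE B (Python) =====
-- def regular(matAdj):
--     n = len(matAdj)
--
--     def zeros(row):
--         return row[:n].count(0)
--
--     def same(rest, z0):
--         if not rest: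
--             return True
--         return zeros(rest[0]) == z0 and same(rest[1:], z0)
--
--     return not matAdj or same(matAdj[1:], zeros(matAdj[0]))
-- ===== Notes on version B (the rewrite author's own statement) =====
-- stated objective: alternative
-- what changed: Instead of A's loop that counts nonzeros per row and compares against a running previous-degree accumulator, B counts ZEROS in each truncated row via list.count(0) (degree = n - zeros, so equal zero-counts iff equal degrees) and recursively checks every later row's zero-count against the first row's.
-- outside the precondition, e.g. on regular([[0, 0, 0], [1, 1, 1], []]): A returns False, B returns False
import Mathlib
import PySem

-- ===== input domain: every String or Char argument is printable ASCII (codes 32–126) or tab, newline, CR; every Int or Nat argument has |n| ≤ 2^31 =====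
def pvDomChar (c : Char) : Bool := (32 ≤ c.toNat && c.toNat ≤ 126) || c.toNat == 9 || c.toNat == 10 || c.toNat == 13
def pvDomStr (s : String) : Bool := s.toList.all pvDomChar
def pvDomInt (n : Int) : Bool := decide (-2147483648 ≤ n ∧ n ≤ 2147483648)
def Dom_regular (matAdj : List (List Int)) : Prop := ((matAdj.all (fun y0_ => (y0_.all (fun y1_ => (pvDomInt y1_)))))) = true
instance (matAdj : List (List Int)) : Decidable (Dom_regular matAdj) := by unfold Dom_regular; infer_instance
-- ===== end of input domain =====

-- B counts ZEROS per truncated row with list.count(0) (degree = n - zeros) and recursively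
-- compares every later row's zero-count with the first row's, instead of A's nonzero-counting
-- loop with a running previous-degree accumulator (objective: alternative).

-- ===== PORT A =====
def regularDeg (matAdj : List (List Int)) (i : Int) : Int :=
  (PySem.List.pyRange 0 (matAdj.length) 1).foldl
    (fun grau j =>
      if PySem.List.pyGetD (PySem.List.pyGetD matAdj i []) j 0 ≠ 0 then grau + 1 else grau) 0

def regularLoop (matAdj : List (List Int)) : List Int → Int → Bool
  | [], _ => true
  | i :: rest, grauAnterior =>
    let grau := regularDeg matAdj i
    if grauAnterior ≠ -1 ∧ grauAnterior ≠ grau then false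
    else regularLoop matAdj rest grau

def regular (matAdj : List (List Int)) : Bool :=
  regularLoop matAdj (PySem.List.pyRange 0 (matAdj.length) 1) (-1)

-- ===== PORT B =====
-- zeros(row) = row[:n].count(0)
def regularZeros (n : Int) (row : List Int) : Nat :=
  PySem.List.count (PySem.List.slice row none (some n)) 0

-- same(rest, z0): recursive check that each row's zero-count equals z0
def regularSame (n : Int) : List (List Int) → Nat → Bool
  | [], _ => true
  | r :: rest, z0 => (regularZeros n r == z0) && regularSame n rest z0

def regular_alt (matAdj : List (List Int)) : Bool :=
  let n : Int := matAdj.length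
  match matAdj with
  | [] => true
  | r0 :: rest => regularSame n rest (regularZeros n r0)

-- ===== PRECONDITION & SPEC =====
-- Pre_ requires every row to have length ≥ len(matAdj): on a shorter row A raises IndexError,
-- except where its early exit happens to hit a degree mismatch first and return False — an
-- accident of scan order (B also returns False on all such inputs).
def Pre_regular (matAdj : List (List Int)) : Prop :=
  ∀ row ∈ matAdj, matAdj.length ≤ row.length
instance (matAdj : List (List Int)) : Decidable (Pre_regular matAdj) := by
  unfold Pre_regular; infer_instance

def pvWitness_regular : List (List Int) := [[0, 1], [1, 0]]

def Spec_regular (matAdj : List (List Int)) (out : Bool) : Prop := out = regular_alt matAdj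
instance (matAdj : List (List Int)) (out : Bool) : Decidable (Spec_regular matAdj out) := by
  unfold Spec_regular; infer_instance

-- ===== CLAIM (what is proved, stated in full; the proofs are below) =====
def Claim_equal_regular : Prop :=
  ∀ (matAdj : List (List Int)), Dom_regular matAdj → Pre_regular matAdj →
    Spec_regular matAdj (regular matAdj)

-- ===== LEMMAS AND PROOFS =====

-- the per-row degree A computes: nonzeros among the first n entries of a row
def degB (n : Nat) (row : List Int) : Nat := ((row.take n).filter (fun x => x != 0)).length

theorem countP_range_deg (row : List Int) (n : Nat) (h : n ≤ row.length) :
    (List.range n).countP (fun (j : Nat) => decide (PySem.List.pyGetD row (j : Int) 0 ≠ 0))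
      = degB n row := by
  induction n with
  | zero => simp [degB]
  | succ m ih =>
    rw [List.range_succ, List.countP_append, ih (by omega)]
    have hm : m < row.length := by omega
    rw [degB, degB, List.take_add_one, List.filter_append,
      List.getElem?_eq_getElem hm, List.length_append]
    have : List.countP (fun (j : Nat) => decide (PySem.List.pyGetD row (j : Int) 0 ≠ 0)) [m]
        = (List.filter (fun x => x != 0) [row[m]]).length := by
      rw [List.countP_singleton, PySem.List.pyGetD_natCast,
        List.getD_eq_getElem?_getD, List.getElem?_eq_getElem hm]
      by_cases hz : row[m] = 0 <;> simp [hz, bne]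
    rw [this]; simp

-- A's inner loop computes degB of the i-th row
theorem regularDeg_eq (matAdj : List (List Int)) (k : Nat)
    (hlen : matAdj.length ≤ (matAdj.getD k []).length) :
    regularDeg matAdj (k : Int) = (degB matAdj.length (matAdj.getD k []) : Int) := by
  rw [regularDeg, PySem.List.pyRange_zero_natCast, PySem.List.pyGetD_natCast]
  rw [List.foldl_map, PySem.List.foldl_ite_add_one
    (p := fun (j : Nat) => PySem.List.pyGetD (matAdj.getD k []) (j : Int) 0 ≠ 0)]
  rw [countP_range_deg _ _ hlen]
  simp

-- A's outer loop with a nonnegative previous degree: all remaining degrees must equal it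
theorem regularLoop_pos (matAdj : List (List Int)) (f : Nat → Nat) :
    ∀ (l : List Nat) (p : Nat),
    (∀ k ∈ l, regularDeg matAdj (k : Int) = (f k : Int)) →
    regularLoop matAdj (l.map (fun k : Nat => (k : Int))) ((p : Nat) : Int)
      = decide (∀ k ∈ l, f k = p) := by
  intro l
  induction l with
  | nil => intro p _; simp [regularLoop]
  | cons k t ih =>
    intro p hdeg
    rw [List.map_cons, regularLoop]
    simp only [hdeg k (by simp)]
    by_cases hpk : p = f k
    · have h2 : ¬ (((p : Int) ≠ -1) ∧ ((p : Int) ≠ ((f k : Nat) : Int))) := by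
        rw [← hpk]; simp
      rw [if_neg h2, ih (f k) (fun k' hk' => hdeg k' (by simp [hk']))]
      simp [← hpk]
    · have h2 : (((p : Int) ≠ -1) ∧ ((p : Int) ≠ ((f k : Nat) : Int))) := by
        constructor <;> omega
      rw [if_pos h2]
      symm; rw [decide_eq_false_iff_not]
      intro hall; exact hpk ((hall k (by simp)).symm)

-- B's recursion decides that every row's zero-count equals z0
theorem regularSame_eq (n : Int) : ∀ (l : List (List Int)) (z0 : Nat),
    regularSame n l z0 = decide (∀ r ∈ l, regularZeros n r = z0) := by
  intro l
  induction l with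
  | nil => intro z0; simp [regularSame]
  | cons r t ih =>
    intro z0
    rw [regularSame, ih]
    by_cases h : regularZeros n r = z0 <;> simp [h]

-- on a row of length ≥ n, zero-count + degree = n
theorem zeros_add_deg (n : Nat) (row : List Int) (h : n ≤ row.length) :
    regularZeros (n : Int) row + degB n row = n := by
  rw [regularZeros, PySem.List.slice_to_natCast, degB]
  rw [PySem.List.count_eq, List.count_eq_countP]
  have := List.length_eq_countP_add_countP (p := fun (x : Int) => x == 0) (l := row.take n)
  rw [List.length_take_of_le h] at this
  rw [List.countP_eq_length_filter.symm]
  have hc : List.countP (fun (x : Int) => x != 0) (row.take n)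
      = List.countP (fun (a : Int) => decide ¬(a == 0) = true) (row.take n) := by
    apply List.countP_congr
    intro x _
    by_cases hx : x = 0 <;> simp [hx, bne]
  omega

-- ===== VERDICT (by name: the statement is the Claim_ definition above) =====
theorem regular_spec : Claim_equal_regular := by
  intro matAdj _ hpre
  unfold Spec_regular
  cases matAdj with
  | nil => decide
  | cons r rs =>
    have hn : (r :: rs).length = rs.length + 1 := by simp
    have hdeg : ∀ k ∈ List.range (r :: rs).length,
        regularDeg (r :: rs) (k : Int)
          = ((fun k => degB (r :: rs).length ((r :: rs).getD k [])) k : Int) := by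
      intro k hk
      apply regularDeg_eq
      rw [List.getD_eq_getElem?_getD, List.getElem?_eq_getElem (List.mem_range.mp hk)]
      exact hpre _ (List.getElem_mem _)
    -- A's side: all later rows' degrees equal row 0's degree
    rw [regular, PySem.List.pyRange_zero_natCast]
    simp only [List.length_cons] at hdeg ⊢
    rw [List.range_succ_eq_map, List.map_cons, regularLoop]
    rw [if_neg (by simp)]
    rw [hdeg 0 (by simp), regularLoop_pos (r :: rs) _ ((List.range rs.length).map Nat.succ) _
      (fun k' hk' => hdeg k' (by rw [List.range_succ_eq_map]; exact List.mem_cons_of_mem _ hk'))]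
    -- B's side: all later rows' zero-counts equal row 0's zero-count
    show _ = regularSame ((rs.length + 1 : Nat) : Int) rs
      (regularZeros ((rs.length + 1 : Nat) : Int) r)
    rw [regularSame_eq, decide_eq_decide]
    -- reindex A's condition over the rows of rs
    have hidx : (∀ k ∈ (List.range rs.length).map Nat.succ,
          degB (rs.length + 1) ((r :: rs).getD k []) = degB (rs.length + 1) r)
        ↔ ∀ row ∈ rs, degB (rs.length + 1) row = degB (rs.length + 1) r := by
      constructor
      · intro h row hrow
        obtain ⟨i, hi, hrw⟩ := List.getElem_of_mem hrow
        have := h (i + 1) (List.mem_map.mpr ⟨i, List.mem_range.mpr hi, rfl⟩)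
        rw [List.getD_cons_succ, List.getD_eq_getElem?_getD,
          List.getElem?_eq_getElem hi, hrw] at this
        simpa using this
      · intro h k hk
        simp only [List.mem_map, List.mem_range] at hk
        obtain ⟨i, hi, rfl⟩ := hk
        rw [Nat.succ_eq_add_one, List.getD_cons_succ, List.getD_eq_getElem?_getD,
          List.getElem?_eq_getElem hi]
        exact h _ (List.getElem_mem _)
    simp only [List.getD_cons_zero]
    rw [hidx]
    -- translate degrees ↔ zero-counts using length bounds from Pre_
    have hr : rs.length + 1 ≤ r.length := by
      have := hpre r (by simp); simpa using this
    constructor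
    · intro h row hrow
      have hrowlen : rs.length + 1 ≤ row.length := by
        have := hpre row (by simp [hrow]); simpa using this
      have h1 := zeros_add_deg (rs.length + 1) row hrowlen
      have h2 := zeros_add_deg (rs.length + 1) r hr
      have := h row hrow
      push_cast at h1 h2 ⊢
      omega
    · intro h k hk
      have hklen : rs.length + 1 ≤ k.length := by
        have := hpre k (by simp [hk]); simpa using this
      have h1 := zeros_add_deg (rs.length + 1) k hklen
      have h2 := zeros_add_deg (rs.length + 1) r hr
      have := h k hk
      push_cast at h1 h2 this
      omega
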